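-- pv_equiv track=rewrite | github.com/drojf-backup/hou-plus-og-sprites-new | main.py | get_vanilla_only
-- ===== SOURCE A (Python) =====
-- def get_vanilla_only(log_lines):
--
--     diff_lines = []
--
--     got_commit = False
--     got_file_start = False
--
--     for line in log_lines:
--         if got_commit:
--             # if start a new commit then finished vanilla commit
--             if line.startswith('commit'):
--                 break
--
--             if got_file_start:
--                 if line.startswith('@@'):
--                     # Ignore for now
--                     pass
--                 else:
--                     diff_lines.append(line)
--
--             if line.startswith('+++'):
--                 got_file_start = True
--
--         if 'aa718717d64aaba84967048c02cc894ffce62fbc' in line: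
--             got_commit = True
--
--     return diff_lines
-- ===== SOURCE B (Python) =====
-- def get_vanilla_only(log_lines):
--     # Phase-based rewrite: locate the commit-hash line, cut the body at the
--     # next 'commit' line, find the first '+++' header, then filter '@@' hunks.
--     H = 'aa718717d64aaba84967048c02cc894ffce62fbc'
--     start = next((i for i, l in enumerate(log_lines) if H in l), -1)
--     if start < 0:
--         return []
--     tail = log_lines[start + 1:]
--     end = next((i for i, l in enumerate(tail) if l.startswith('commit')), len(tail))
--     body = tail[:end]
--     f = next((i for i, l in enumerate(body) if l.startswith('+++')), -1)
--     if f < 0: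
--         return []
--     return [l for l in body[f + 1:] if not l.startswith('@@')]
-- ===== Notes on version B (the rewrite author's own statement) =====
-- stated objective: simpler
-- what changed: Replaced A's single flag-based state machine with a phase decomposition: locate the hash line, slice off the tail, cut it at the next 'commit' line, find the first '+++' header, and filter out '@@' lines with a comprehension.
import Mathlib
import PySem

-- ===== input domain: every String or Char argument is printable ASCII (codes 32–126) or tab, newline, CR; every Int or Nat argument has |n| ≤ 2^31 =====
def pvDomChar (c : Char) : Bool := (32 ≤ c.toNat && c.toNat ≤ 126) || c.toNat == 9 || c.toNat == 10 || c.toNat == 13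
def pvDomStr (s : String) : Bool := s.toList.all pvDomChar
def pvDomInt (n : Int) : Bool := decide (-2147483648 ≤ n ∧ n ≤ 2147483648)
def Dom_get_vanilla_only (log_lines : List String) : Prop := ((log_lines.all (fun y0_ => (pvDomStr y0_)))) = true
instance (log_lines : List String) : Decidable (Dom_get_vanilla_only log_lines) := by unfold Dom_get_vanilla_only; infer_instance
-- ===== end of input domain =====

-- B replaces A's flag-driven single loop by a phase decomposition (find hash line,
-- cut at next 'commit', find first '+++' header, filter '@@' lines) — objective: simpler.

-- the commit hash constant, shared by both ports
def pvHash : String := "aa718717d64aaba84967048c02cc894ffce62fbc"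

-- ===== PORT A =====
-- A's loop: state = (diff_lines, got_commit, got_file_start); break returns diff_lines
def goA : List String → List String → Bool → Bool → List String
  | [], diff_lines, _, _ => diff_lines
  | line :: rest, diff_lines, got_commit, got_file_start =>
    if got_commit then
      if PySem.Str.startswith line "commit" then diff_lines
      else
        let diff_lines' :=
          if got_file_start then
            if PySem.Str.startswith line "@@" then diff_lines else diff_lines ++ [line]
          else diff_lines
        let gfs := if PySem.Str.startswith line "+++" then true else got_file_start
        let gc := if PySem.Str.isIn pvHash line then true else got_commit
        goA rest diff_lines' gc gfs
    else
      let gc := if PySem.Str.isIn pvHash line then true else got_commit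
      goA rest diff_lines gc got_file_start

def get_vanilla_only (log_lines : List String) : List String :=
  goA log_lines [] false false

-- ===== PORT B =====
def get_vanilla_only_alt (log_lines : List String) : List String :=
  match log_lines.findIdx? (fun l => PySem.Str.isIn pvHash l) with
  | none => []
  | some start =>
    let tail := log_lines.drop (start + 1)
    let e := (tail.findIdx? (fun l => PySem.Str.startswith l "commit")).getD tail.length
    let body := tail.take e
    match body.findIdx? (fun l => PySem.Str.startswith l "+++") with
    | none => []
    | some f => (body.drop (f + 1)).filter (fun l => !(PySem.Str.startswith l "@@"))

-- ===== PRECONDITION & SPEC =====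
def Spec_get_vanilla_only (log_lines : List String) (out : List String) : Prop := out = get_vanilla_only_alt log_lines
instance (log_lines : List String) (out : List String) : Decidable (Spec_get_vanilla_only log_lines out) := by unfold Spec_get_vanilla_only; infer_instance

-- ===== CLAIM (what is proved, stated in full; the proofs are below) =====
def Claim_equal_get_vanilla_only : Prop := ∀ (log_lines : List String), Dom_get_vanilla_only log_lines → Spec_get_vanilla_only log_lines (get_vanilla_only log_lines)

-- ===== LEMMAS AND PROOFS =====

-- take up to the first index where p holds = takeWhile (!p)
lemma take_findIdx?_getD {α : Type} (p : α → Bool) (xs : List α) :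
    xs.take ((xs.findIdx? p).getD xs.length) = xs.takeWhile (fun x => !p x) := by
  induction xs with
  | nil => simp
  | cons x xs ih =>
    cases h : p x with
    | true => simp [List.findIdx?_cons, h]
    | false =>
      cases h2 : xs.findIdx? p with
      | none => simpa [List.findIdx?_cons, h, h2] using ih
      | some i => simpa [List.findIdx?_cons, h, h2] using ih

-- phase 3: after the '+++' header, A appends every non-'@@' line until 'commit'
lemma goA_true_true (lines acc : List String) :
    goA lines acc true true =
      acc ++ (lines.takeWhile (fun l => !(PySem.Str.startswith l "commit"))).filter
        (fun l => !(PySem.Str.startswith l "@@")) := by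
  induction lines generalizing acc with
  | nil => simp [goA]
  | cons line rest ih =>
    cases hc : PySem.Str.startswith line "commit" with
    | true => simp at hc; simp [goA, hc]
    | false =>
      cases ha : PySem.Str.startswith line "@@" with
      | true => simp at hc ha; simp [goA, hc, ha, ih]
      | false => simp at hc ha; simp [goA, hc, ha, ih]

-- phase 2: between the hash line and 'commit', A waits for the first '+++'
lemma goA_true_false (lines acc : List String) :
    goA lines acc true false =
      acc ++ (match (lines.takeWhile (fun l => !(PySem.Str.startswith l "commit"))).findIdx?
                (fun l => PySem.Str.startswith l "+++") with
              | none => []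
              | some f =>
                  ((lines.takeWhile (fun l => !(PySem.Str.startswith l "commit"))).drop (f + 1)).filter
                    (fun l => !(PySem.Str.startswith l "@@"))) := by
  induction lines generalizing acc with
  | nil => simp [goA]
  | cons line rest ih =>
    cases hc : PySem.Str.startswith line "commit" with
    | true => simp at hc; simp [goA, hc]
    | false =>
      cases hp : PySem.Str.startswith line "+++" with
      | true =>
        have h3 := goA_true_true rest acc
        simp at hc hp
        simp [goA, hc, hp, h3, List.findIdx?_cons]
      | false =>
        simp at hc hp
        simp only [goA, List.takeWhile_cons]
        simp [hc, hp, ih, List.findIdx?_cons]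
        cases (List.takeWhile (fun l => !PySem.Chars.startswith l.toList ['c', 'o', 'm', 'm', 'i', 't']) rest).findIdx?
            (fun l => PySem.Chars.startswith l.toList ['+', '+', '+']) <;> simp

-- phase 1: before the hash line A does nothing
lemma goA_false (lines acc : List String) :
    goA lines acc false false =
      match lines.findIdx? (fun l => PySem.Str.isIn pvHash l) with
      | none => acc
      | some i => goA (lines.drop (i + 1)) acc true false := by
  induction lines generalizing acc with
  | nil => simp [goA]
  | cons line rest ih =>
    cases hh : PySem.Str.isIn pvHash line with
    | true => simp at hh; simp [goA, hh, List.findIdx?_cons]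
    | false =>
      simp at hh
      simp [goA, hh, ih, List.findIdx?_cons]
      cases rest.findIdx? (fun l => PySem.Chars.isIn pvHash.toList l.toList) <;> simp

-- ===== VERDICT (by name: the statement is the Claim_ definition above) =====
theorem get_vanilla_only_spec : Claim_equal_get_vanilla_only := by
  intro log_lines _
  unfold Spec_get_vanilla_only get_vanilla_only get_vanilla_only_alt
  rw [goA_false]
  cases hf : log_lines.findIdx? (fun l => PySem.Str.isIn pvHash l) with
  | none => rfl
  | some i =>
    simp only [goA_true_false, List.nil_append,
      take_findIdx?_getD (fun l => PySem.Str.startswith l "commit") (log_lines.drop (i + 1))]
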